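-- pv_equiv track=rewrite | github.com/thomas-che/tp_m1_miage | crypto/chalenge2/file/correction/td2.py | decipher_mini_rc4_with_initial_state
-- ===== SOURCE A (Python) =====
-- alnum = "ABCDEFGHIJKLMNOPQRSTUVWXYZabcdefghijklmnopqrstuvwxyz0123456789. "
--
-- def encoder(message):
--     """
--     Encode un message en octal.
--     Chaque caractère (lettres minuscules et majuscules, chiffres, point et
--     espace) est codé par 2 entiers de 3 bits. Par exemple, le caractère 'U'
--     est codé en [2, 4].
--     """
--     code = []
--     for c in message:
--         v = alnum.index(c)
--         code.append(v // 8)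
--         code.append(v % 8)
--     return code
--
-- def decoder(code):
--     """
--     Décode un message encodé en octal.
--     """
--     message = ""
--     for i in range(len(code) // 2):
--         message += alnum[8 * code[2 * i] + code[2 * i + 1]]
--     return message
--
-- def get_bits(S, i, j):
--     """
--     Retourne un nouvel état et une valeur octale pseudo-aléatoire, à partir
--     d'un état du système Mini RC4.
--     """
--     i = (i + 1) % 8
--     j = (j + S[i]) % 8
--     S[i], S[j] = S[j], S[i]
--     t = (S[i] + S[j]) % 8
--     y = S[t]
--     return S, i, j, y
--
-- def decipher_mini_rc4_with_initial_state(chiffre, initial_state):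
--     """
--     Applique un déchiffrement Mini RC4 à un message chiffré, à partir d'un
--     état initial donné. Le résultat obtenu peut ne pas être correct
--     (c'est-à-dire ne pas être un message en clair), si l'état initial
--     considéré n'est pas celui qui avait réellement servi à chiffrer le
--     message.
--     """
--     c = encoder(chiffre)
--     i, j = 0, 0
--     m = []
--     S = initial_state
--     for x in c:
--         S, i, j, y = get_bits(S, i, j)
--         m.append(x ^ y)
--     return decoder(m)
-- ===== SOURCE B (Python) =====
-- alnum = "ABCDEFGHIJKLMNOPQRSTUVWXYZabcdefghijklmnopqrstuvwxyz0123456789. "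
--
--
-- def decipher_mini_rc4_with_initial_state(chiffre, initial_state):
--     # The keystream is message-independent and the two 3-bit digits occupy
--     # disjoint bit fields, so (v//8 ^ y1)*8 + (v%8 ^ y2) == v ^ (8*y1 + y2):
--     # pack each keystream pair into one 6-bit value and XOR whole indices,
--     # with no octal encode/decode at all.  Mutates initial_state in place
--     # like the original.
--     S = initial_state
--     i = j = 0
--     res = []
--     for ch in chiffre:
--         k = 0
--         for _ in range(2):
--             i = (i + 1) % 8
--             j = (j + S[i]) % 8
--             S[i], S[j] = S[j], S[i]
--             k = 8 * k + S[(S[i] + S[j]) % 8]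
--         res.append(alnum[alnum.index(ch) ^ k])
--     return "".join(res)
-- ===== Notes on version B (the rewrite author's own statement) =====
-- stated objective: alternative
-- what changed: Drops the octal encode/stream/decode pipeline entirely: since the two 3-bit digits occupy disjoint bit fields, B packs each keystream pair into one 6-bit value k = 8*y1+y2 and maps each character directly via alnum[alnum.index(c) ^ k], never splitting a character into digits or rebuilding one from digits.
-- outside the precondition, e.g. on decipher_mini_rc4_with_initial_state('q', [10, 3, 6, 6, 12, 9, -2, 12]): A returns 'm', B returns 'W'; on decipher_mini_rc4_with_initial_state('A', [0, 1]): A raises IndexError, B raises IndexError; on decipher_mini_rc4_with_initial_state('@', [0, 1, 2, 3, 4, 5, 6, 7]): A raises ValueError, B raises ValueError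
import Mathlib
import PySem

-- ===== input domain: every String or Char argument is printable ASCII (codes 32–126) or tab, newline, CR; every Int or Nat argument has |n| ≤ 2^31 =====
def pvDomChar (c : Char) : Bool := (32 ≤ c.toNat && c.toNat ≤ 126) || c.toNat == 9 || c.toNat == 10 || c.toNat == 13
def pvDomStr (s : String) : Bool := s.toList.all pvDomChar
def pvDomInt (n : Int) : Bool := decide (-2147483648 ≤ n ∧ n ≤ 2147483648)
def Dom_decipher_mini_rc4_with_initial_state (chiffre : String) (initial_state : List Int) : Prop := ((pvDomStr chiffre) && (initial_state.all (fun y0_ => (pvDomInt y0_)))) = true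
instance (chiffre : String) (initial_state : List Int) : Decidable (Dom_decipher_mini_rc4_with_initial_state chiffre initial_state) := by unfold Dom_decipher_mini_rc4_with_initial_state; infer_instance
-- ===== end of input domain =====

-- B replaces the octal encode/stream/decode pipeline by whole-index XOR with a packed 6-bit keystream value
-- (return-value equivalence; both Pythons mutate initial_state in place identically).

-- ===== PORT A =====
def pvAlnum : List Char :=
  "ABCDEFGHIJKLMNOPQRSTUVWXYZabcdefghijklmnopqrstuvwxyz0123456789. ".toList

def pvEncoder (message : List Char) : List Int :=
  message.foldl (fun code c =>
    let v : Int := (((PySem.List.index? pvAlnum c).getD 0 : Nat) : Int)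
    code ++ [PySem.Int.floordiv v 8, PySem.Int.mod v 8]) []

def pvGetBits (S : List Int) (i j : Int) : List Int × Int × Int × Int :=
  let i' := PySem.Int.mod (i + 1) 8
  let j' := PySem.Int.mod (j + PySem.List.pyGetD S i' 0) 8
  let si := PySem.List.pyGetD S i' 0
  let sj := PySem.List.pyGetD S j' 0
  let S2 := PySem.List.pySetD (PySem.List.pySetD S i' sj) j' si
  let t := PySem.Int.mod (PySem.List.pyGetD S2 i' 0 + PySem.List.pyGetD S2 j' 0) 8
  (S2, i', j', PySem.List.pyGetD S2 t 0)

def pvDecoder (code : List Int) : List Char :=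
  (PySem.List.pyRange 0 (PySem.Int.floordiv (PySem.List.len code) 2) 1).foldl
    (fun message k =>
      message ++ [PySem.List.pyGetD pvAlnum
        (8 * PySem.List.pyGetD code (2 * k) 0 + PySem.List.pyGetD code (2 * k + 1) 0) ' ']) []

def decipher_mini_rc4_with_initial_state (chiffre : String) (initial_state : List Int) : String :=
  let c := pvEncoder chiffre.toList
  let st := c.foldl (fun (st : List Int × Int × Int × List Int) x =>
      match st with
      | (S, i, j, m) =>
        match pvGetBits S i j with
        | (S', i', j', y) => (S', i', j', m ++ [PySem.Int.bxor x y]))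
    (initial_state, 0, 0, [])
  String.ofList (pvDecoder st.2.2.2)

-- ===== PORT B =====
-- B's inner two-iteration loop body: one RC4 state update, packing the octal output into k (k = 8*k + S[t])
def pvK : (List Int × Int × Int × Int) → Int → (List Int × Int × Int × Int) :=
  fun q _ =>
    match q with
    | (S, i, j, k) =>
      let i' := PySem.Int.mod (i + 1) 8
      let j' := PySem.Int.mod (j + PySem.List.pyGetD S i' 0) 8
      let si := PySem.List.pyGetD S i' 0
      let sj := PySem.List.pyGetD S j' 0
      let S2 := PySem.List.pySetD (PySem.List.pySetD S i' sj) j' si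
      let t := PySem.Int.mod (PySem.List.pyGetD S2 i' 0 + PySem.List.pyGetD S2 j' 0) 8
      (S2, i', j', 8 * k + PySem.List.pyGetD S2 t 0)

def decipher_mini_rc4_with_initial_state_alt (chiffre : String) (initial_state : List Int) : String :=
  let st := chiffre.toList.foldl (fun (st : List Int × Int × Int × List Char) ch =>
      match st with
      | (S, i, j, res) =>
        match (PySem.List.pyRange 0 2 1).foldl pvK (S, i, j, (0 : Int)) with
        | (S', i', j', k) =>
          (S', i', j', res ++ [PySem.List.pyGetD pvAlnum
            (PySem.Int.bxor (((PySem.List.index? pvAlnum ch).getD 0 : Nat) : Int) k) ' '])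
      )
    (initial_state, 0, 0, ([] : List Char))
  String.ofList st.2.2.2

-- ===== PRECONDITION & SPEC =====
-- Pre_ excludes inputs where Python A raises (a character outside alnum: ValueError; a state too short
-- or with cells outside 0..7, which can drive an index out of range: IndexError) — whether an out-of-range
-- cell actually crashes or wraps around depends on the keystream, so Pre_ conservatively requires the
-- RC4 state cells read by the cipher to lie in 0..7, the intended permutation domain; on the excluded
-- inputs where wraparound lets A return anyway, A's value is an accident of indexing and B's differs.
def Pre_decipher_mini_rc4_with_initial_state (chiffre : String) (initial_state : List Int) : Prop :=
  (chiffre.toList.all (fun c => pvAlnum.contains c) &&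
   (chiffre.toList.isEmpty ||
     (decide (8 ≤ initial_state.length) &&
      (initial_state.take 8).all (fun s => decide (0 ≤ s) && decide (s < 8))))) = true
instance (chiffre : String) (initial_state : List Int) : Decidable (Pre_decipher_mini_rc4_with_initial_state chiffre initial_state) := by unfold Pre_decipher_mini_rc4_with_initial_state; infer_instance

def pvWitness_decipher_mini_rc4_with_initial_state : String × List Int :=
  ("Hello.", [3, 1, 4, 0, 5, 2, 7, 6])

def Spec_decipher_mini_rc4_with_initial_state (chiffre : String) (initial_state : List Int) (out : String) : Prop := out = decipher_mini_rc4_with_initial_state_alt chiffre initial_state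
instance (chiffre : String) (initial_state : List Int) (out : String) : Decidable (Spec_decipher_mini_rc4_with_initial_state chiffre initial_state out) := by unfold Spec_decipher_mini_rc4_with_initial_state; infer_instance

-- ===== CLAIM (what is proved, stated in full; the proofs are below) =====
def Claim_equal_decipher_mini_rc4_with_initial_state : Prop := ∀ (chiffre : String) (initial_state : List Int), Dom_decipher_mini_rc4_with_initial_state chiffre initial_state → Pre_decipher_mini_rc4_with_initial_state chiffre initial_state → Spec_decipher_mini_rc4_with_initial_state chiffre initial_state (decipher_mini_rc4_with_initial_state chiffre initial_state)

-- ===== LEMMAS AND PROOFS =====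

-- A's stream-loop body, named for the proofs
def pvFA : (List Int × Int × Int × List Int) → Int → (List Int × Int × Int × List Int) :=
  fun st x =>
    match st with
    | (S, i, j, m) =>
      match pvGetBits S i j with
      | (S', i', j', y) => (S', i', j', m ++ [PySem.Int.bxor x y])

-- B's outer-loop body, named for the proofs
def pvFB : (List Int × Int × Int × List Char) → Char → (List Int × Int × Int × List Char) :=
  fun st ch =>
    match st with
    | (S, i, j, res) =>
      match (PySem.List.pyRange 0 2 1).foldl pvK (S, i, j, (0 : Int)) with
      | (S', i', j', k) =>
        (S', i', j', res ++ [PySem.List.pyGetD pvAlnum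
          (PySem.Int.bxor (((PySem.List.index? pvAlnum ch).getD 0 : Nat) : Int) k) ' '])

lemma pvA_eq (chiffre : String) (S0 : List Int) :
    decipher_mini_rc4_with_initial_state chiffre S0 =
      String.ofList (pvDecoder ((pvEncoder chiffre.toList).foldl pvFA (S0, 0, 0, [])).2.2.2) := rfl

lemma pvB_eq (chiffre : String) (S0 : List Int) :
    decipher_mini_rc4_with_initial_state_alt chiffre S0 =
      String.ofList ((chiffre.toList.foldl pvFB (S0, 0, 0, [])).2.2.2) := rfl

-- B's inner step is one A-style state step with the octal value packed into k
lemma pvK_eq (S : List Int) (i j k z : Int) :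
    pvK (S, i, j, k) z =
      ((pvGetBits S i j).1, (pvGetBits S i j).2.1, (pvGetBits S i j).2.2.1,
        8 * k + (pvGetBits S i j).2.2.2) := rfl

-- the octal digits of a character
def pvDigits (c : Char) : List Int :=
  let v : Int := (((PySem.List.index? pvAlnum c).getD 0 : Nat) : Int)
  [PySem.Int.floordiv v 8, PySem.Int.mod v 8]

lemma pvEncoder_flatMap (cs : List Char) : pvEncoder cs = cs.flatMap pvDigits := by
  unfold pvEncoder pvDigits
  rw [PySem.List.foldl_append_eq_flatMap]
  simp

-- the invariant: state long enough, first 8 cells in the octal range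
def pvGood (S : List Int) : Prop :=
  8 ≤ S.length ∧ ∀ x ∈ S.take 8, 0 ≤ x ∧ x < 8

lemma pvRead_mem (S : List Int) (n : Int) (hlen : 8 ≤ S.length)
    (h0 : 0 ≤ n) (h8 : n < 8) : PySem.List.pyGetD S n 0 ∈ S.take 8 := by
  have hlt : n < (S.length : Int) := by omega
  rw [PySem.List.pyGetD_eq_getElem S 0 h0 hlt]
  have hn : n.toNat < 8 := by omega
  have : (S.take 8)[n.toNat]'(by simp; omega) = S[n.toNat]'(by omega) := by
    simp [List.getElem_take]
  rw [← this]
  exact List.getElem_mem _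

-- one state step preserves the invariant and yields an octal keystream value
lemma pvStep_good (S : List Int) (i j : Int) (h : pvGood S) :
    pvGood (pvGetBits S i j).1 ∧
      0 ≤ (pvGetBits S i j).2.2.2 ∧ (pvGetBits S i j).2.2.2 < 8 := by
  obtain ⟨hlen, hcell⟩ := h
  unfold pvGetBits
  simp only []
  set i' := PySem.Int.mod (i + 1) 8 with hi'
  have hi'0 : 0 ≤ i' := PySem.Int.mod_nonneg _ (by norm_num)
  have hi'8 : i' < 8 := PySem.Int.mod_lt _ (by norm_num)
  set j' := PySem.Int.mod (j + PySem.List.pyGetD S i' 0) 8 with hj'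
  have hj'0 : 0 ≤ j' := PySem.Int.mod_nonneg _ (by norm_num)
  have hj'8 : j' < 8 := PySem.Int.mod_lt _ (by norm_num)
  set si := PySem.List.pyGetD S i' 0 with hsi
  set sj := PySem.List.pyGetD S j' 0 with hsj
  have hsi_mem : si ∈ S.take 8 := pvRead_mem S i' hlen hi'0 hi'8
  have hsj_mem : sj ∈ S.take 8 := pvRead_mem S j' hlen hj'0 hj'8
  set S2 := PySem.List.pySetD (PySem.List.pySetD S i' sj) j' si with hS2
  have hS2eq : S2 = (S.set i'.toNat sj).set j'.toNat si := by
    rw [hS2, PySem.List.pySetD_of_nonneg _ _ hi'0, PySem.List.pySetD_of_nonneg _ _ hj'0]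
  have hlen2 : S2.length = S.length := by rw [hS2eq]; simp
  have hgood2 : pvGood S2 := by
    refine ⟨by omega, ?_⟩
    intro x hx
    have htake : S2.take 8 = ((S.take 8).set i'.toNat sj).set j'.toNat si := by
      rw [hS2eq, List.take_set, List.take_set]
    rw [htake] at hx
    rcases List.mem_or_eq_of_mem_set hx with h2 | h2
    · rcases List.mem_or_eq_of_mem_set h2 with h3 | h3
      · exact hcell _ h3
      · exact hcell _ (h3 ▸ hsj_mem)
    · exact hcell _ (h2 ▸ hsi_mem)
  set t := PySem.Int.mod (PySem.List.pyGetD S2 i' 0 + PySem.List.pyGetD S2 j' 0) 8 with ht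
  have ht0 : 0 ≤ t := PySem.Int.mod_nonneg _ (by norm_num)
  have ht8 : t < 8 := PySem.Int.mod_lt _ (by norm_num)
  have hy : PySem.List.pyGetD S2 t 0 ∈ S2.take 8 :=
    pvRead_mem S2 t (by omega) ht0 ht8
  exact ⟨hgood2, (hgood2.2 _ hy).1, (hgood2.2 _ hy).2⟩

-- digit packing: XOR acts on the two 3-bit fields independently (Nat form, finite check)
lemma pvPackNat : ∀ v : Nat, v < 64 → ∀ y1 : Nat, y1 < 8 → ∀ y2 : Nat, y2 < 8 →
    8 * ((v / 8) ^^^ y1) + (v % 8 ^^^ y2) = v ^^^ (8 * y1 + y2) := by decide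

-- digit packing, Int form as used by the two ports
lemma pvPackInt (v y1 y2 : Int) (hv0 : 0 ≤ v) (hv : v < 64)
    (hy10 : 0 ≤ y1) (hy1 : y1 < 8) (hy20 : 0 ≤ y2) (hy2 : y2 < 8) :
    8 * PySem.Int.bxor (PySem.Int.floordiv v 8) y1 + PySem.Int.bxor (PySem.Int.mod v 8) y2 =
      PySem.Int.bxor v (8 * y1 + y2) := by
  obtain ⟨a, rfl⟩ : ∃ a : Nat, v = (a : Int) := ⟨v.toNat, by omega⟩
  obtain ⟨b, rfl⟩ : ∃ b : Nat, y1 = (b : Int) := ⟨y1.toNat, by omega⟩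
  obtain ⟨c, rfl⟩ : ∃ c : Nat, y2 = (c : Int) := ⟨y2.toNat, by omega⟩
  have h8 : (8 : Int) = ((8 : Nat) : Int) := by norm_num
  rw [h8, PySem.Int.floordiv_natCast, PySem.Int.mod_natCast, PySem.Int.bxor_natCast,
    PySem.Int.bxor_natCast]
  have hbc : ((8 : Nat) : Int) * (b : Int) + (c : Int) = ((8 * b + c : Nat) : Int) := by push_cast; ring
  rw [hbc, PySem.Int.bxor_natCast]
  have := pvPackNat a (by omega) b (by omega) c (by omega)
  push_cast
  omega

-- splitting the m accumulator out of A's stream loop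
lemma pvFA_acc (code : List Int) : ∀ (S : List Int) (i j : Int) (m : List Int),
    code.foldl pvFA (S, i, j, m) =
      ((code.foldl pvFA (S, i, j, [])).1, (code.foldl pvFA (S, i, j, [])).2.1,
       (code.foldl pvFA (S, i, j, [])).2.2.1, m ++ (code.foldl pvFA (S, i, j, [])).2.2.2) := by
  induction code with
  | nil => intro S i j m; simp
  | cons x xs ih =>
    intro S i j m
    simp only [List.foldl_cons]
    conv_lhs => rw [show pvFA (S, i, j, m) x =
      (let r := pvGetBits S i j; (r.1, r.2.1, r.2.2.1, m ++ [PySem.Int.bxor x r.2.2.2])) from rfl]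
    conv_rhs => rw [show pvFA (S, i, j, []) x =
      (let r := pvGetBits S i j; (r.1, r.2.1, r.2.2.1, [] ++ [PySem.Int.bxor x r.2.2.2])) from rfl]
    rcases pvGetBits S i j with ⟨S', i', j', y⟩
    rw [ih S' i' j' (m ++ [PySem.Int.bxor x y]), ih S' i' j' ([] ++ [PySem.Int.bxor x y])]
    simp

-- splitting the res accumulator out of B's loop
lemma pvFB_acc (cs : List Char) : ∀ (S : List Int) (i j : Int) (res : List Char),
    cs.foldl pvFB (S, i, j, res) =
      ((cs.foldl pvFB (S, i, j, [])).1, (cs.foldl pvFB (S, i, j, [])).2.1,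
       (cs.foldl pvFB (S, i, j, [])).2.2.1, res ++ (cs.foldl pvFB (S, i, j, [])).2.2.2) := by
  induction cs with
  | nil => intro S i j res; simp
  | cons c cs ih =>
    intro S i j res
    simp only [List.foldl_cons]
    have h : ∀ o : List Char, pvFB (S, i, j, o) c =
        ((pvFB (S, i, j, []) c).1, (pvFB (S, i, j, []) c).2.1, (pvFB (S, i, j, []) c).2.2.1,
         o ++ (pvFB (S, i, j, []) c).2.2.2) := by
      intro o
      simp only [pvFB]
      rcases hms : (PySem.List.pyRange 0 2 1).foldl pvK (S, i, j, (0 : Int)) with ⟨S', i', j', k⟩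
      simp
    rw [h res, h []]
    rcases hfb : pvFB (S, i, j, []) c with ⟨S', i', j', o1⟩
    simp only [List.nil_append]
    rw [ih S' i' j' (res ++ o1), ih S' i' j' o1]
    simp

-- the decoder as a map over the index range
lemma pvDecoder_map (code : List Int) :
    pvDecoder code =
      (PySem.List.pyRange 0 (PySem.Int.floordiv (PySem.List.len code) 2) 1).map
        (fun k => PySem.List.pyGetD pvAlnum
          (8 * PySem.List.pyGetD code (2 * k) 0 + PySem.List.pyGetD code (2 * k + 1) 0) ' ') := by
  unfold pvDecoder
  rw [PySem.List.foldl_append_singleton_eq_map]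
  simp

lemma pvDecoder_nil : pvDecoder [] = [] := by decide

lemma pvGetD_one_cons (x y : Int) (xs : List Int) (d : Int) :
    PySem.List.pyGetD (x :: y :: xs) 1 d = y := by
  rw [show (1 : Int) = ((1 : Nat) : Int) from rfl, PySem.List.pyGetD_natCast]
  simp [List.getD]

lemma pvGetD_cons2 (a b : Int) (xs : List Int) (n : Nat) :
    PySem.List.pyGetD (a :: b :: xs) ((n : Int) + 2) 0 = PySem.List.pyGetD xs (n : Int) 0 := by
  rw [show ((n : Int) + 2) = ((n + 2 : Nat) : Int) by push_cast; ring,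
      PySem.List.pyGetD_natCast, PySem.List.pyGetD_natCast]
  simp [List.getD]

lemma pvDecoder_cons (a b : Int) (rest : List Int) :
    pvDecoder (a :: b :: rest) =
      PySem.List.pyGetD pvAlnum (8 * a + b) ' ' :: pvDecoder rest := by
  rw [pvDecoder_map, pvDecoder_map]
  have hlen : PySem.Int.floordiv (PySem.List.len (a :: b :: rest)) 2 =
      ((rest.length / 2 + 1 : Nat) : Int) := by
    have h2 : (a :: b :: rest).length = rest.length + 2 := by simp
    rw [PySem.List.len_eq, h2, PySem.Int.floordiv_eq_ediv_of_pos (by norm_num : (0:Int) < 2)]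
    omega
  have hlen' : PySem.Int.floordiv (PySem.List.len rest) 2 = ((rest.length / 2 : Nat) : Int) := by
    rw [PySem.List.len_eq, PySem.Int.floordiv_eq_ediv_of_pos (by norm_num : (0:Int) < 2)]
    omega
  rw [hlen, hlen', PySem.List.pyRange_one, PySem.List.pyRange_one]
  simp only [Int.sub_zero, Int.toNat_natCast, List.map_map]
  rw [List.range_succ_eq_map]
  simp only [List.map_cons, List.map_map]
  congr 1
  · norm_num
    rw [pvGetD_one_cons]
  · apply List.map_congr_left
    intro k _
    simp only [Function.comp]
    have h1 : (2 : Int) * (0 + ((k + 1 : Nat) : Int)) = ((2 * k : Nat) : Int) + 2 := by push_cast; ring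
    have h2 : ((2 * k : Nat) : Int) + 2 + 1 = ((2 * k + 1 : Nat) : Int) + 2 := by push_cast; ring
    have h3 : (2 : Int) * (0 + (k : Int)) = ((2 * k : Nat) : Int) := by push_cast; ring
    have h4 : ((2 * k : Nat) : Int) + 1 = ((2 * k + 1 : Nat) : Int) := by push_cast; ring
    rw [h1, h2, h3, pvGetD_cons2, pvGetD_cons2, h4]

-- main induction: A's staged octal pipeline equals B's packed-XOR loop, from any good state
lemma pv_main (cs : List Char) : ∀ (S : List Int) (i j : Int), pvGood S →
    (∀ c ∈ cs, c ∈ pvAlnum) →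
    pvDecoder ((cs.flatMap pvDigits).foldl pvFA (S, i, j, [])).2.2.2 =
      (cs.foldl pvFB (S, i, j, [])).2.2.2 := by
  induction cs with
  | nil => intro S i j _ _; simpa using pvDecoder_nil
  | cons c cs ih =>
    intro S i j hgood hmem
    have hgb1 := pvStep_good S i j hgood
    rcases hg : pvGetBits S i j with ⟨S1, i1, j1, y1⟩
    rw [hg] at hgb1
    have hgb2 := pvStep_good S1 i1 j1 hgb1.1
    rcases hg2 : pvGetBits S1 i1 j1 with ⟨S2, i2, j2, y2⟩
    rw [hg2] at hgb2
    -- the character's index and bounds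
    have hc : c ∈ pvAlnum := hmem c (List.mem_cons_self)
    obtain ⟨n, hn⟩ := Option.isSome_iff_exists.1 ((PySem.List.index?_isSome_iff _ _).2 hc)
    obtain ⟨hk, _, _⟩ := PySem.List.getElem_of_index?_eq_some hn
    have hn64 : n < 64 := by
      have : pvAlnum.length = 64 := by decide
      omega
    have hvdef : (((PySem.List.index? pvAlnum c).getD 0 : Nat) : Int) = ((n : Nat) : Int) := by
      rw [hn]; rfl
    have hd : pvDigits c = [PySem.Int.floordiv ((n : Nat) : Int) 8, PySem.Int.mod ((n : Nat) : Int) 8] := by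
      simp only [pvDigits, hvdef]
    set d1 := PySem.Int.floordiv ((n : Nat) : Int) 8 with hd1
    set d2 := PySem.Int.mod ((n : Nat) : Int) 8 with hd2
    -- left side
    have hA2 : ∀ x m, pvFA (S, i, j, m) x =
        (S1, i1, j1, m ++ [PySem.Int.bxor x y1]) := by
      intro x m; simp only [pvFA]; rw [hg]
    have hA2' : ∀ x m, pvFA (S1, i1, j1, m) x =
        (S2, i2, j2, m ++ [PySem.Int.bxor x y2]) := by
      intro x m; simp only [pvFA]; rw [hg2]
    have hL : ((c :: cs).flatMap pvDigits).foldl pvFA (S, i, j, []) =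
        (((cs.flatMap pvDigits).foldl pvFA (S2, i2, j2, [])).1,
         ((cs.flatMap pvDigits).foldl pvFA (S2, i2, j2, [])).2.1,
         ((cs.flatMap pvDigits).foldl pvFA (S2, i2, j2, [])).2.2.1,
         [PySem.Int.bxor d1 y1, PySem.Int.bxor d2 y2] ++
           ((cs.flatMap pvDigits).foldl pvFA (S2, i2, j2, [])).2.2.2) := by
      rw [List.flatMap_cons, hd]
      simp only [List.cons_append, List.nil_append, List.foldl_cons]
      rw [hA2 d1 []]
      simp only [List.nil_append]
      rw [hA2' d2 [PySem.Int.bxor d1 y1]]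
      rw [pvFA_acc]
      simp
    -- right side: first step of B
    have hrange : PySem.List.pyRange 0 2 1 = [0, 1] := by decide
    have hB1 : pvFB (S, i, j, []) c =
        (S2, i2, j2,
          [PySem.List.pyGetD pvAlnum
            (PySem.Int.bxor ((n : Nat) : Int) (8 * y1 + y2)) ' ']) := by
      simp only [pvFB, hvdef, hrange]
      simp only [List.foldl_cons, List.foldl_nil]
      have s1 : pvK (S, i, j, (0 : Int)) 0 = (S1, i1, j1, y1) := by
        rw [pvK_eq, hg]; norm_num
      have s2 : pvK (S1, i1, j1, y1) 1 = (S2, i2, j2, 8 * y1 + y2) := by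
        rw [pvK_eq, hg2]
      rw [s1, s2]
      simp
    have hR : (c :: cs).foldl pvFB (S, i, j, []) =
        ((cs.foldl pvFB (S2, i2, j2, [])).1, (cs.foldl pvFB (S2, i2, j2, [])).2.1,
         (cs.foldl pvFB (S2, i2, j2, [])).2.2.1,
         [PySem.List.pyGetD pvAlnum
            (PySem.Int.bxor ((n : Nat) : Int) (8 * y1 + y2)) ' '] ++
           (cs.foldl pvFB (S2, i2, j2, [])).2.2.2) := by
      simp only [List.foldl_cons]
      rw [hB1, pvFB_acc]
    rw [hL, hR]
    simp only [List.cons_append, List.nil_append]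
    rw [pvDecoder_cons, ih S2 i2 j2 hgb2.1 (fun c' hc' => hmem c' (List.mem_cons_of_mem _ hc'))]
    congr 2
    exact pvPackInt ((n : Nat) : Int) y1 y2 (by positivity) (by exact_mod_cast hn64)
      hgb1.2.1 hgb1.2.2 hgb2.2.1 hgb2.2.2

-- ===== VERDICT (by name: the statement is the Claim_ definition above) =====
theorem decipher_mini_rc4_with_initial_state_spec : Claim_equal_decipher_mini_rc4_with_initial_state := by
  intro chiffre S0 _hdom hpre
  show decipher_mini_rc4_with_initial_state chiffre S0 =
    decipher_mini_rc4_with_initial_state_alt chiffre S0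
  rw [pvA_eq, pvB_eq, pvEncoder_flatMap]
  simp only [Pre_decipher_mini_rc4_with_initial_state, Bool.and_eq_true, Bool.or_eq_true,
    List.all_eq_true, decide_eq_true_eq] at hpre
  obtain ⟨hall, hrest⟩ := hpre
  rcases hrest with hemp | ⟨hlen, hcells⟩
  · have : chiffre.toList = [] := by simpa [List.isEmpty_iff] using hemp
    rw [this]
    simpa using pvDecoder_nil
  · have hgood : pvGood S0 := by
      refine ⟨hlen, ?_⟩
      intro x hx
      simpa using hcells x hx
    have hmem : ∀ c ∈ chiffre.toList, c ∈ pvAlnum := by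
      intro c hc
      have := hall c hc
      simpa [List.contains_iff_mem] using this
    rw [pv_main chiffre.toList S0 0 0 hgood hmem]
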